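-- pv_equiv track=rewrite | github.com/Ghinc/tets_rag | rag_v6_gretriever.py | _resolve_node_type
-- ===== SOURCE A (Python) =====
-- from typing import List, Dict, Tuple, Optional
--
-- LABEL_TO_TYPE = {
--     "Concept": "Concept",
--     "Dimension": "Dimension",
--     "Indicator": "Indicator",
--     "ObjectiveIndicator": "Indicator",
--     "SubjectiveIndicator": "Indicator",
--     "Commune": "Commune",
--     "Municipality": "Commune",
--     "IndicatorValue": "IndicatorValue",
--     "Country": "SpatialUnit",
--     "Region": "SpatialUnit",
--     "Department": "SpatialUnit",
--     "QuantitativeSurvey": "DataSource",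
--     "Verbatim": "DataSource",
--     "WikipediaArticle": "DataSource",
--     "Interview": "DataSource",
--     "StatisticalDataset": "DataSource",
-- }
--
-- LABEL_PRIORITY = [
--     "ObjectiveIndicator", "SubjectiveIndicator",
--     "Municipality", "Department", "Region", "Country",
--     "QuantitativeSurvey", "Verbatim", "WikipediaArticle",
--     "Interview", "StatisticalDataset",
--     "Concept", "Dimension", "Indicator", "Commune", "IndicatorValue",
-- ]
--
-- def _resolve_node_type(labels: List[str]) -> str:
--     """Determine le type PyG a partir des labels Neo4j (priorite au plus specifique)."""
--     for label in LABEL_PRIORITY: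
--         if label in labels:
--             return LABEL_TO_TYPE[label]
--     for label in labels:
--         if label in LABEL_TO_TYPE:
--             return LABEL_TO_TYPE[label]
--     return "Unknown"
-- ===== SOURCE B (Python) =====
-- LABEL_TO_TYPE = {
--     "Concept": "Concept",
--     "Dimension": "Dimension",
--     "Indicator": "Indicator",
--     "ObjectiveIndicator": "Indicator",
--     "SubjectiveIndicator": "Indicator",
--     "Commune": "Commune",
--     "Municipality": "Commune",
--     "IndicatorValue": "IndicatorValue",
--     "Country": "SpatialUnit",
--     "Region": "SpatialUnit",
--     "Department": "SpatialUnit",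
--     "QuantitativeSurvey": "DataSource",
--     "Verbatim": "DataSource",
--     "WikipediaArticle": "DataSource",
--     "Interview": "DataSource",
--     "StatisticalDataset": "DataSource",
-- }
--
-- LABEL_PRIORITY = [
--     "ObjectiveIndicator", "SubjectiveIndicator",
--     "Municipality", "Department", "Region", "Country",
--     "QuantitativeSurvey", "Verbatim", "WikipediaArticle",
--     "Interview", "StatisticalDataset",
--     "Concept", "Dimension", "Indicator", "Commune", "IndicatorValue",
-- ]
--
-- _RANK = {label: i for i, label in enumerate(LABEL_PRIORITY)}
--
-- def _resolve_node_type(labels):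
--     """Single pass over labels keeping the label of minimum priority rank."""
--     best = None  # (rank, label)
--     for label in labels:
--         r = _RANK.get(label)
--         if r is not None and (best is None or r < best[0]):
--             best = (r, label)
--     return LABEL_TO_TYPE[best[1]] if best is not None else "Unknown"
-- ===== Notes on version B (the rewrite author's own statement) =====
-- stated objective: faster
-- what changed: Replaces A's scan of the 16-entry priority list (each step a membership test over labels, plus a dead fallback loop over labels) with a precomputed label->rank dict and one running-minimum pass over labels.
import Mathlib
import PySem

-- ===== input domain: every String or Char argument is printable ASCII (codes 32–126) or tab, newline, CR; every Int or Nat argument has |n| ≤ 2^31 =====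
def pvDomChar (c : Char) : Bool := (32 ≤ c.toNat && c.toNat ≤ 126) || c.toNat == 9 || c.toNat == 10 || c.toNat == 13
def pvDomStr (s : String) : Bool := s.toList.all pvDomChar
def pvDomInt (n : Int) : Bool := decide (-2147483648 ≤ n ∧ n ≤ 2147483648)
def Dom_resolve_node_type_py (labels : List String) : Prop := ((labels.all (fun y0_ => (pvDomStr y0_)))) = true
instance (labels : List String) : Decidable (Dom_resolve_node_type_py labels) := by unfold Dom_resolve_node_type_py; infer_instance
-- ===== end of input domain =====

-- B replaces A's scan of the 16-entry priority list (with a dead fallback loop) by a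
-- label→rank index and one running-minimum pass over the input labels (idiomatic rewrite).

-- ===== PORT A =====
def LABEL_TO_TYPE : PySem.Dict String String := PySem.Dict.mk [
  ("Concept", "Concept"), ("Dimension", "Dimension"), ("Indicator", "Indicator"),
  ("ObjectiveIndicator", "Indicator"), ("SubjectiveIndicator", "Indicator"),
  ("Commune", "Commune"), ("Municipality", "Commune"),
  ("IndicatorValue", "IndicatorValue"),
  ("Country", "SpatialUnit"), ("Region", "SpatialUnit"), ("Department", "SpatialUnit"),
  ("QuantitativeSurvey", "DataSource"), ("Verbatim", "DataSource"),
  ("WikipediaArticle", "DataSource"), ("Interview", "DataSource"),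
  ("StatisticalDataset", "DataSource")]

def LABEL_PRIORITY : List String := [
  "ObjectiveIndicator", "SubjectiveIndicator",
  "Municipality", "Department", "Region", "Country",
  "QuantitativeSurvey", "Verbatim", "WikipediaArticle",
  "Interview", "StatisticalDataset",
  "Concept", "Dimension", "Indicator", "Commune", "IndicatorValue"]

-- first loop: 'for label in LABEL_PRIORITY: if label in labels: return LABEL_TO_TYPE[label]'
-- (the KeyError branch of LABEL_TO_TYPE[label] is unreachable: every priority label is a key)
def aLoop1 : List String → List String → Option String
  | [], _ => none
  | p :: ps, labels => if labels.contains p then LABEL_TO_TYPE.get? p else aLoop1 ps labels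

-- second loop: 'for label in labels: if label in LABEL_TO_TYPE: return LABEL_TO_TYPE[label]'
def aLoop2 : List String → Option String
  | [] => none
  | l :: ls => if LABEL_TO_TYPE.contains l then LABEL_TO_TYPE.get? l else aLoop2 ls

def resolve_node_type_py (labels : List String) : String :=
  match aLoop1 LABEL_PRIORITY labels with
  | some t => t
  | none =>
    match aLoop2 labels with
    | some t => t
    | none => "Unknown"

-- ===== PORT B =====
-- _RANK = {label: i for i, label in enumerate(LABEL_PRIORITY)}
def RANK : PySem.Dict String Int :=
  PySem.Dict.ofList ((PySem.List.enumerate LABEL_PRIORITY 0).map (fun p => (p.2, p.1)))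

-- 'for label in labels: r = _RANK.get(label); if r is not None and (best is None or r < best[0]): best = (r, label)'
def bLoop : List String → Option (Int × String) → Option (Int × String)
  | [], best => best
  | l :: ls, best =>
    match RANK.get? l with
    | none => bLoop ls best
    | some r =>
      match best with
      | none => bLoop ls (some (r, l))
      | some b => if r < b.1 then bLoop ls (some (r, l)) else bLoop ls best

def resolve_node_type_py_alt (labels : List String) : String :=
  match bLoop labels none with
  | some b =>
    -- LABEL_TO_TYPE[best[1]]; KeyError unreachable: best's label is a key of _RANK, hence of LABEL_TO_TYPE
    match LABEL_TO_TYPE.get? b.2 with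
    | some t => t
    | none => ""
  | none => "Unknown"

-- ===== PRECONDITION & SPEC =====
def Spec_resolve_node_type_py (labels : List String) (out : String) : Prop := out = resolve_node_type_py_alt labels
instance (labels : List String) (out : String) : Decidable (Spec_resolve_node_type_py labels out) := by unfold Spec_resolve_node_type_py; infer_instance

-- ===== CLAIM (what is proved, stated in full; the proofs are below) =====
def Claim_equal_resolve_node_type_py : Prop := ∀ (labels : List String), Dom_resolve_node_type_py labels → Spec_resolve_node_type_py labels (resolve_node_type_py labels)

-- ===== LEMMAS AND PROOFS =====

-- the enumerated priority list, as an association list (label, rank)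
def pvE : List (String × Int) := [
  ("ObjectiveIndicator", 0), ("SubjectiveIndicator", 1),
  ("Municipality", 2), ("Department", 3), ("Region", 4), ("Country", 5),
  ("QuantitativeSurvey", 6), ("Verbatim", 7), ("WikipediaArticle", 8),
  ("Interview", 9), ("StatisticalDataset", 10),
  ("Concept", 11), ("Dimension", 12), ("Indicator", 13), ("Commune", 14), ("IndicatorValue", 15)]

-- plain association-list lookup (first match)
def lk : List (String × Int) → String → Option Int
  | [], _ => none
  | (k, v) :: rest, x => if k = x then some v else lk rest x

-- 'first entry of e whose label occurs in labels', with its rank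
def fP : List (String × Int) → List String → Option (Int × String)
  | [], _ => none
  | (p, i) :: rest, labels => if p ∈ labels then some (i, p) else fP rest labels

-- merge two candidates, preferring the left one unless the right has strictly smaller rank
def mg : Option (Int × String) → Option (Int × String) → Option (Int × String)
  | none, b => b
  | some a, none => some a
  | some a, some b => if b.1 < a.1 then some b else some a

theorem lk_mem {e : List (String × Int)} {l : String} {i : Int}
    (h : lk e l = some i) : i ∈ e.map (·.2) := by
  induction e with
  | nil => simp [lk] at h
  | cons hd tl ih =>
    obtain ⟨k, v⟩ := hd
    by_cases hk : k = l
    · simp [lk, hk] at h; simp [h]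
    · simp [lk, hk] at h; simp [ih h]

theorem lk_key_mem {e : List (String × Int)} {l : String} {i : Int}
    (h : lk e l = some i) : ∃ q ∈ e, q.1 = l := by
  induction e with
  | nil => simp [lk] at h
  | cons hd tl ih =>
    obtain ⟨k, v⟩ := hd
    by_cases hk : k = l
    · exact ⟨(k, v), by simp, hk⟩
    · simp [lk, hk] at h
      obtain ⟨q, hq, hql⟩ := ih h
      exact ⟨q, by simp [hq], hql⟩

theorem lk_isSome_of_key {e : List (String × Int)} {q : String × Int}
    (hq : q ∈ e) : (lk e q.1).isSome := by
  induction e with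
  | nil => simp at hq
  | cons hd tl ih =>
    obtain ⟨k, v⟩ := hd
    rcases List.mem_cons.mp hq with hq | hq
    · subst hq; simp [lk]
    · simp only [lk]
      by_cases hk : k = q.1 <;> simp [hk, ih hq]

theorem fP_mem {e : List (String × Int)} {labels : List String} {i : Int} {p : String}
    (h : fP e labels = some (i, p)) : (p, i) ∈ e := by
  induction e with
  | nil => simp [fP] at h
  | cons hd tl ih =>
    obtain ⟨k, v⟩ := hd
    by_cases hk : k ∈ labels
    · simp [fP, hk] at h; simp [h.1, h.2]
    · simp [fP, hk] at h; simp [ih h]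

theorem fP_none {e : List (String × Int)} {labels : List String}
    (h : fP e labels = none) : ∀ q ∈ e, q.1 ∉ labels := by
  induction e with
  | nil => simp
  | cons hd tl ih =>
    obtain ⟨k, v⟩ := hd
    by_cases hk : k ∈ labels
    · simp [fP, hk] at h
    · simp [fP, hk] at h
      intro q hq
      rcases List.mem_cons.mp hq with hq | hq
      · simpa [hq] using hk
      · exact ih h q hq

theorem mg_assoc (a b c : Option (Int × String)) : mg (mg a b) c = mg a (mg b c) := by
  rcases a with _ | a
  · simp [mg]
  rcases b with _ | b
  · cases c <;> simp [mg]
  rcases c with _ | c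
  · simp only [mg]
    split_ifs <;> simp
  · simp only [mg]
    split_ifs <;> simp only <;> split_ifs <;> first | rfl | omega

-- decomposition of the first-match scan at a cons of the label list
theorem fP_cons (e : List (String × Int)) (hp : e.Pairwise (fun a b => a.2 < b.2))
    (l : String) (t : List String) :
    fP e (l :: t) = mg ((lk e l).map (fun i => (i, l))) (fP e t) := by
  induction e with
  | nil => simp [fP, lk, mg]
  | cons hd tl ih =>
    obtain ⟨p0, i0⟩ := hd
    rw [List.pairwise_cons] at hp
    obtain ⟨hlt, hp'⟩ := hp
    by_cases h1 : p0 = l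
    · subst h1
      by_cases h2 : p0 ∈ t
      · simp [fP, lk, h2, mg]
      · simp only [fP, lk, List.mem_cons, true_or, if_true, Option.map_some,
          if_neg h2]
        cases hfp : fP tl t with
        | none => simp [mg]
        | some q =>
          obtain ⟨j, p⟩ := q
          have : i0 < j := hlt (p, j) (fP_mem hfp)
          simp only [mg]
          rw [if_neg (by omega)]
    · by_cases h2 : p0 ∈ t
      · have hcons : p0 ∈ l :: t := by simp [h2]
        simp only [fP, lk, hcons, if_true, if_neg h1, if_pos h2]
        cases hlk : lk tl l with
        | none => simp [mg]
        | some j =>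
          have hij : i0 < j := by
            have hm := lk_mem hlk
            simp only [List.mem_map] at hm
            obtain ⟨q, hq, hqj⟩ := hm
            have := hlt q hq
            omega
          simp only [Option.map_some, mg]
          rw [if_pos (by omega)]
      · have hcons : p0 ∉ l :: t := by simp [h1, h2]
        simp only [fP, lk, if_neg hcons, if_neg h1, if_neg h2]
        exact ih hp'

-- the running-minimum loop computes the merge of its accumulator with the pure result
theorem bLoop_acc (ls : List String) : ∀ acc, bLoop ls acc = mg acc (bLoop ls none) := by
  induction ls with
  | nil => intro acc; cases acc <;> simp [bLoop, mg]
  | cons l t ih =>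
    intro acc
    cases hr : RANK.get? l with
    | none => simp only [bLoop, hr]; exact ih acc
    | some r =>
      have step : ∀ a, bLoop (l :: t) a = bLoop t (mg a (some (r, l))) := by
        intro a
        cases a with
        | none => simp [bLoop, hr, mg]
        | some b =>
          simp only [bLoop, hr, mg]
          by_cases hlt : r < b.1 <;> simp [hlt]
      rw [step acc, step none]
      rw [ih (mg acc (some (r, l))), ih (mg none (some (r, l)))]
      simp only [mg]
      exact mg_assoc acc (some (r, l)) (bLoop t none)

-- concrete facts about the two literal tables
theorem rank_mk : RANK = PySem.Dict.mk pvE := by decide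

theorem get?_mk_eq_lk (e : List (String × Int)) (l : String) :
    (PySem.Dict.mk e).get? l = lk e l := by
  induction e with
  | nil => rfl
  | cons hd tl ih =>
    obtain ⟨k, v⟩ := hd
    rw [PySem.Dict.get?_mk_cons]
    simp only [lk]
    by_cases hk : k = l <;> simp [hk, ih]

theorem rank_eq_lk (l : String) : RANK.get? l = lk pvE l := by
  rw [rank_mk, get?_mk_eq_lk]

theorem pvE_pairwise : pvE.Pairwise (fun a b => a.2 < b.2) := by decide

-- B's pure loop result equals the first-match scan of the priority table
theorem bLoop_eq_fP (labels : List String) : bLoop labels none = fP pvE labels := by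
  induction labels with
  | nil => decide
  | cons l t ih =>
    rw [fP_cons pvE pvE_pairwise]
    cases hr : RANK.get? l with
    | none =>
      have hlk : lk pvE l = none := by rw [← rank_eq_lk, hr]
      simp only [bLoop, hr, hlk, Option.map_none, ih]
      simp [mg]
    | some r =>
      have hlk : lk pvE l = some r := by rw [← rank_eq_lk, hr]
      simp only [bLoop, hr, hlk, Option.map_some]
      rw [bLoop_acc t (some (r, l)), ih]

-- A's first loop is the first-match scan followed by the type lookup
theorem aLoop1_eq (e : List (String × Int)) (labels : List String) :
    aLoop1 (e.map (·.1)) labels = (fP e labels).bind (fun x => LABEL_TO_TYPE.get? x.2) := by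
  induction e with
  | nil => simp [aLoop1, fP]
  | cons hd tl ih =>
    obtain ⟨p, i⟩ := hd
    by_cases hk : p ∈ labels <;>
      simp [aLoop1, fP, List.contains_eq_mem, hk, ih]

theorem priority_eq_map : LABEL_PRIORITY = pvE.map (·.1) := by decide

-- every entry of the priority table is a key of LABEL_TO_TYPE
theorem pvE_keys_typed : ∀ q ∈ pvE, (LABEL_TO_TYPE.get? q.1).isSome := by decide

-- a key of LABEL_TO_TYPE is exactly a label of the priority table
theorem contains_iff_lk (l : String) :
    LABEL_TO_TYPE.contains l = (lk pvE l).isSome := by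
  rw [PySem.Dict.contains_eq_isSome_get?]
  have h2 : (l ∈ LABEL_TO_TYPE.keys) ↔ ∃ q ∈ pvE, q.1 = l := by
    constructor
    · intro h; fin_cases h <;> decide
    · rintro ⟨q, hq, rfl⟩; fin_cases hq <;> decide
  cases hg : LABEL_TO_TYPE.get? l with
  | none =>
    have hnk := (PySem.Dict.get?_eq_none_iff_not_mem_keys (d := LABEL_TO_TYPE) (k := l)).mp hg
    cases hlk : lk pvE l with
    | none => rfl
    | some i =>
      exact absurd (h2.mpr (lk_key_mem hlk)) hnk
  | some v =>
    have hk : l ∈ LABEL_TO_TYPE.keys := by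
      by_contra hnk
      have hnone := (PySem.Dict.get?_eq_none_iff_not_mem_keys (d := LABEL_TO_TYPE) (k := l)).mpr hnk
      rw [hg] at hnone
      simp at hnone
    obtain ⟨q, hq, hql⟩ := h2.mp hk
    have hsome := lk_isSome_of_key hq
    rw [hql] at hsome
    obtain ⟨i, hi⟩ := Option.isSome_iff_exists.mp hsome
    rw [hi]; rfl

theorem aLoop2_none (labels : List String)
    (h : ∀ l ∈ labels, LABEL_TO_TYPE.contains l = false) : aLoop2 labels = none := by
  induction labels with
  | nil => rfl
  | cons l t ih =>
    have hl := h l (by simp)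
    simp only [aLoop2, hl]
    simpa using ih (fun x hx => h x (by simp [hx]))

-- ===== VERDICT (by name: the statement is the Claim_ definition above) =====
theorem resolve_node_type_py_spec : Claim_equal_resolve_node_type_py := by
  intro labels _
  unfold Spec_resolve_node_type_py
  unfold resolve_node_type_py resolve_node_type_py_alt
  rw [priority_eq_map, aLoop1_eq, bLoop_eq_fP]
  cases hfp : fP pvE labels with
  | some q =>
    obtain ⟨i, p⟩ := q
    have hk := pvE_keys_typed (p, i) (fP_mem hfp)
    cases hg : LABEL_TO_TYPE.get? p with
    | none => rw [hg] at hk; simp at hk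
    | some t => simp [hg]
  | none =>
    have h2 : aLoop2 labels = none := by
      apply aLoop2_none
      intro l hl
      rw [contains_iff_lk]
      cases hlk : lk pvE l with
      | none => simp
      | some i =>
        exfalso
        obtain ⟨q, hq, hql⟩ := lk_key_mem hlk
        exact fP_none hfp q hq (hql ▸ hl)
    simp [h2]
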